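-- pv_equiv track=rewrite | github.com/rossana24/NLU2024 | SA/functions.py | ot2bieos_ote
-- ===== SOURCE A (Python) =====
-- def ot2bieos_ote(ote_tag_sequence):
--     """
--     Convert opinion targets (OT) to BIOES tags.
--
--     :param ote_tag_sequence: List of OT tags.
--     :return: List of BIOES tags.
--     """
--     n_tags = len(ote_tag_sequence)
--     new_ote_sequence = []
--     prev_ote_tag = '$$$'
--     for i in range(n_tags):
--         cur_ote_tag = ote_tag_sequence[i]
--         if cur_ote_tag == 'O':
--             new_ote_sequence.append('O')
--         else:
--             # cur_ote_tag is T
--             if prev_ote_tag != cur_ote_tag: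
--                 # prev_ote_tag is O, new_cur_tag can only be B or S
--                 if i == n_tags - 1:
--                     new_ote_sequence.append('S')
--                 elif ote_tag_sequence[i + 1] == cur_ote_tag:
--                     new_ote_sequence.append('B')
--                 elif ote_tag_sequence[i + 1] != cur_ote_tag:
--                     new_ote_sequence.append('S')
--                 else:
--                     raise Exception("Invalid ner tag value: %s" % cur_ote_tag)
--             else:
--                 # prev_tag is T, new_cur_tag can only be I or E
--                 if i == n_tags - 1:
--                     new_ote_sequence.append('E')
--                 elif ote_tag_sequence[i + 1] == cur_ote_tag:
--                     # next_tag is T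
--                     new_ote_sequence.append('I')
--                 elif ote_tag_sequence[i + 1] != cur_ote_tag:
--                     # next_tag is O
--                     new_ote_sequence.append('E')
--                 else:
--                     raise Exception("Invalid ner tag value: %s" % cur_ote_tag)
--         prev_ote_tag = cur_ote_tag
--     return new_ote_sequence
-- ===== SOURCE B (Python) =====
-- def ot2bieos_ote(ote_tag_sequence):
--     """
--     Convert opinion targets (OT) to BIOES tags.
--
--     Two stages: run-length encode the sequence into maximal runs of equal
--     adjacent tags, then expand each run to its whole BIOES pattern:
--     an 'O'-run stays 'O'*k, a length-1 target run is 'S',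
--     a longer one is 'B' + 'I'*(k-2) + 'E'.
--     """
--     runs = []
--     for t in ote_tag_sequence:
--         if runs and runs[-1][0] == t:
--             runs[-1] = (t, runs[-1][1] + 1)
--         else:
--             runs.append((t, 1))
--     out = []
--     for t, k in runs:
--         if t == 'O':
--             out += ['O'] * k
--         elif k == 1:
--             out += ['S']
--         else:
--             out += ['B'] + ['I'] * (k - 2) + ['E']
--     return out
-- ===== Notes on version B (the rewrite author's own statement) =====
-- stated objective: alternative
-- what changed: B replaces A's single pass with a carried previous tag and nested prev/next branching by a two-stage algorithm: run-length encode the sequence into maximal runs of equal tags, then expand each run to its whole BIOES pattern ('O'*k, 'S', or 'B'+'I'*(k-2)+'E').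
-- intended difference: On sequences whose first tag is the literal string '$$$' (A's sentinel), A returns a continuation tag (E/I) at position 0 while B returns the intended start tag (S/B), since the first tag of a sequence always starts its run. — e.g. on ot2bieos_ote(["$$$"]): A returns ["E"], B returns ["S"]
import Mathlib
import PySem

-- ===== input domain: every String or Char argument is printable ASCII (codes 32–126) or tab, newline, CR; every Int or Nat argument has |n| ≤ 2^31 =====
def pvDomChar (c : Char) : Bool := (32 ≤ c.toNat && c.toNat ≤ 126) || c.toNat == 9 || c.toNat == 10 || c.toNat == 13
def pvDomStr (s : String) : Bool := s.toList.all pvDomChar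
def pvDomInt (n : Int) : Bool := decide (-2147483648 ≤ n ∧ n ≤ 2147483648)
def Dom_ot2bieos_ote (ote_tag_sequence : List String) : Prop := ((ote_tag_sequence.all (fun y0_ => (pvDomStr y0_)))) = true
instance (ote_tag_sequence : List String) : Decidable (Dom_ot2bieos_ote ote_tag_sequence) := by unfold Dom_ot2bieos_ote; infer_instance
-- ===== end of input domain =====

-- B replaces A's single pass with a carried previous tag by a two-stage algorithm
-- (run-length encode, then expand each run to its BIOES pattern); on inputs whose first
-- tag is A's sentinel string "$$$" B returns the intended start tag (see D_ below).

-- ===== PORT A =====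
-- Literal port of A: a fold over range(n) carrying (prev_ote_tag, new_ote_sequence);
-- indexing s[i]/s[i+1] is via getD (every access is in range, so this is exact).
def ot2bieos_ote (ote_tag_sequence : List String) : List String :=
  let n := ote_tag_sequence.length
  ((List.range n).foldl (fun (st : String × List String) (i : Nat) =>
    let prev := st.1
    let acc := st.2
    let cur := ote_tag_sequence.getD i ""
    let acc' :=
      if cur = "O" then acc ++ ["O"]
      else
        if prev ≠ cur then
          if i = n - 1 then acc ++ ["S"]
          else if ote_tag_sequence.getD (i+1) "" = cur then acc ++ ["B"]
          else acc ++ ["S"]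
        else
          if i = n - 1 then acc ++ ["E"]
          else if ote_tag_sequence.getD (i+1) "" = cur then acc ++ ["I"]
          else acc ++ ["E"]
    (cur, acc')) ("$$$", [])).2

-- ===== PORT B =====
-- Literal port of Source B's first loop body: merge the tag into the last run if the tags
-- agree ('runs[-1] = (t, runs[-1][1] + 1)'), else append a fresh run ('runs.append((t, 1))').
def runsStep (rs : List (String × Nat)) (t : String) : List (String × Nat) :=
  match rs.getLast? with
  | some (u, k) => if u = t then rs.dropLast ++ [(t, k + 1)] else rs ++ [(t, 1)]
  | none => [(t, 1)]

-- Literal port of B: the run-length-encoding loop, then the expansion loop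
-- ('out += pattern' per run).
def ot2bieos_ote_alt (ote_tag_sequence : List String) : List String :=
  (ote_tag_sequence.foldl runsStep []).foldl (fun out r =>
    out ++ (if r.1 = "O" then List.replicate r.2 "O"
            else if r.2 = 1 then ["S"]
            else "B" :: (List.replicate (r.2 - 2) "I" ++ ["E"]))) []

-- ===== PRECONDITION & SPEC =====
-- On sequences whose first tag is the literal "$$$" (A's sentinel), A labels position 0 as a
-- continuation (E/I) while B returns the intended start tag (S/B): the first tag always starts a run.
def D_ot2bieos_ote (ote_tag_sequence : List String) : Prop :=
  ote_tag_sequence.head? = some "$$$"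
instance (ote_tag_sequence : List String) : Decidable (D_ot2bieos_ote ote_tag_sequence) := by
  unfold D_ot2bieos_ote; infer_instance

def Spec_ot2bieos_ote (ote_tag_sequence : List String) (out : List String) : Prop :=
  ¬ D_ot2bieos_ote ote_tag_sequence → out = ot2bieos_ote_alt ote_tag_sequence
instance (ote_tag_sequence : List String) (out : List String) : Decidable (Spec_ot2bieos_ote ote_tag_sequence out) := by
  unfold Spec_ot2bieos_ote; infer_instance

def pvDiffWitness_ot2bieos_ote : List String := ["$$$"]
def pvDiffWitnessOut_ot2bieos_ote : (List String) × (List String) := (["E"], ["S"])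

-- ===== CLAIM (what is proved, stated in full; the proofs are below) =====
def Claim_unchanged_ot2bieos_ote : Prop := ∀ (ote_tag_sequence : List String), Dom_ot2bieos_ote ote_tag_sequence → Spec_ot2bieos_ote ote_tag_sequence (ot2bieos_ote ote_tag_sequence)
def Claim_changed_ot2bieos_ote : Prop := Dom_ot2bieos_ote (pvDiffWitness_ot2bieos_ote) ∧ D_ot2bieos_ote (pvDiffWitness_ot2bieos_ote) ∧ ot2bieos_ote (pvDiffWitness_ot2bieos_ote) = pvDiffWitnessOut_ot2bieos_ote.1 ∧ ot2bieos_ote_alt (pvDiffWitness_ot2bieos_ote) = pvDiffWitnessOut_ot2bieos_ote.2 ∧ pvDiffWitnessOut_ot2bieos_ote.1 ≠ pvDiffWitnessOut_ot2bieos_ote.2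
def Claim_exact_ot2bieos_ote : Prop := ∀ (ote_tag_sequence : List String), Dom_ot2bieos_ote ote_tag_sequence → D_ot2bieos_ote ote_tag_sequence → ot2bieos_ote ote_tag_sequence ≠ ot2bieos_ote_alt ote_tag_sequence

-- ===== LEMMAS AND PROOFS =====

-- Common recursive characterisation: process the list left to right knowing the previous tag
-- (none = forced run start; A's position 0 with its sentinel is `some "$$$"`).
def bieosRec (prev : Option String) (s : List String) : List String :=
  match s with
  | [] => []
  | t :: rest =>
    (if t = "O" then "O"
     else if prev ≠ some t then (match rest with | [] => "S" | u :: _ => if u = t then "B" else "S")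
     else (match rest with | [] => "E" | u :: _ => if u = t then "I" else "E")) :: bieosRec (some t) rest

-- A's fold over range(n) equals bieosRec, via the suffix invariant.
theorem foldA_eq (s : List String) (l : List String) (j : Nat) (prev : String) (acc : List String)
    (hdrop : s.drop j = l) (hlen : j + l.length = s.length) :
    ((List.range' j l.length).foldl (fun (st : String × List String) (i : Nat) =>
      let p := st.1
      let a := st.2
      let cur := s.getD i ""
      let a' :=
        if cur = "O" then a ++ ["O"]
        else
          if p ≠ cur then
            if i = s.length - 1 then a ++ ["S"]
            else if s.getD (i+1) "" = cur then a ++ ["B"]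
            else a ++ ["S"]
          else
            if i = s.length - 1 then a ++ ["E"]
            else if s.getD (i+1) "" = cur then a ++ ["I"]
            else a ++ ["E"]
      (cur, a')) (prev, acc)).2 = acc ++ bieosRec (some prev) l := by
  induction l generalizing j prev acc with
  | nil => simp [bieosRec]
  | cons t rest ih =>
    have hj : s[j]? = some t := by
      have : (s.drop j)[0]? = some t := by rw [hdrop]; rfl
      simpa [List.getElem?_drop] using this
    have hcur : s.getD j "" = t := by simp [List.getD, hj]
    have hdrop' : s.drop (j+1) = rest := by
      have : (s.drop j).drop 1 = rest := by rw [hdrop]; rfl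
      simpa [List.drop_drop, Nat.add_comm] using this
    have hnext : ∀ u r, rest = u :: r → s.getD (j+1) "" = u := by
      intro u r hr
      have : (s.drop (j+1))[0]? = some u := by rw [hdrop', hr]; rfl
      have : s[j+1]? = some u := by simpa [List.getElem?_drop] using this
      simp [List.getD, this]
    simp only [List.length_cons]
    rw [List.range'_succ, List.foldl_cons]
    cases rest with
    | nil =>
      simp only [List.length_cons, List.length_nil] at hlen
      have hlast : j = s.length - 1 := by omega
      have hcur2 : s[s.length - 1]?.getD "" = t := by rw [← hlast]; simpa [List.getD] using hcur
      by_cases hO : t = "O"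
      · simp [bieosRec, hcur2, hlast, hO]
      · by_cases hp : prev = t <;>
          simp [bieosRec, hcur2, hlast, hO, hp]
    | cons u r =>
      have hnu : s.getD (j+1) "" = u := hnext u r rfl
      simp only [List.length_cons] at hlen
      have hnotlast : ¬ j = s.length - 1 := by omega
      simp only [hcur, hnu, hnotlast, if_false]
      by_cases hO : t = "O"
      · have := ih (j := j+1) (prev := t) (acc := acc ++ ["O"]) hdrop' (by simp; omega)
        simpa [bieosRec, hO, this]
      · by_cases hp : prev = t <;> by_cases hu : u = t
        · have := ih (j := j+1) (prev := t) (acc := acc ++ ["I"]) hdrop' (by simp; omega)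
          simpa [bieosRec, hO, hp, hu, this]
        · have := ih (j := j+1) (prev := t) (acc := acc ++ ["E"]) hdrop' (by simp; omega)
          simpa [bieosRec, hO, hp, hu, this]
        · have := ih (j := j+1) (prev := t) (acc := acc ++ ["B"]) hdrop' (by simp; omega)
          simpa [bieosRec, hO, hp, hu, this]
        · have := ih (j := j+1) (prev := t) (acc := acc ++ ["S"]) hdrop' (by simp; omega)
          simpa [bieosRec, hO, hp, hu, this]

theorem a_eq (s : List String) : ot2bieos_ote s = bieosRec (some "$$$") s := by
  have := foldA_eq s s 0 "$$$" [] (by simp) (by simp)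
  simpa [ot2bieos_ote, List.range_eq_range'] using this

-- B's per-run pattern.
def runPat (r : String × Nat) : List String :=
  if r.1 = "O" then List.replicate r.2 "O"
  else if r.2 = 1 then ["S"]
  else "B" :: (List.replicate (r.2 - 2) "I" ++ ["E"])

-- A run of "O"s is transparent to bieosRec.
theorem bieos_O_run (m : Nat) (p : Option String) (rest : List String) :
    bieosRec p ("O" :: (List.replicate m "O" ++ rest)) =
      List.replicate (m + 1) "O" ++ bieosRec (some "O") rest := by
  induction m generalizing p with
  | zero => simp [bieosRec]
  | succ m ih =>
    rw [List.replicate_succ, List.cons_append]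
    rw [show bieosRec p ("O" :: "O" :: (List.replicate m "O" ++ rest)) =
        "O" :: bieosRec (some "O") ("O" :: (List.replicate m "O" ++ rest)) by simp [bieosRec]]
    rw [ih]
    simp [List.replicate_succ]

-- Inside a non-"O" run: continuation tags I…IE.
theorem bieos_mid_run (t : String) (hO : t ≠ "O") (m : Nat) (rest : List String)
    (hrest : rest.head? ≠ some t) :
    bieosRec (some t) (t :: (List.replicate m t ++ rest)) =
      List.replicate m "I" ++ ["E"] ++ bieosRec (some t) rest := by
  induction m with
  | zero =>
    cases rest with
    | nil => simp [bieosRec, hO]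
    | cons u r =>
      have hu : u ≠ t := by intro h; exact hrest (by simp [h])
      simp [bieosRec, hO, hu]
  | succ m ih =>
    rw [List.replicate_succ, List.cons_append]
    rw [show bieosRec (some t) (t :: t :: (List.replicate m t ++ rest)) =
        "I" :: bieosRec (some t) (t :: (List.replicate m t ++ rest)) by simp [bieosRec, hO]]
    rw [ih]
    simp [List.replicate_succ]

-- A whole maximal run (fresh previous tag) yields exactly its BIOES pattern.
theorem bieos_run (t : String) (m : Nat) (p : Option String) (hp : p ≠ some t)
    (rest : List String) (hrest : rest.head? ≠ some t) :
    bieosRec p (t :: (List.replicate m t ++ rest)) =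
      runPat (t, 1 + m) ++ bieosRec (some t) rest := by
  by_cases hO : t = "O"
  · subst hO
    rw [bieos_O_run]
    simp [runPat, Nat.add_comm]
  · cases m with
    | zero =>
      cases rest with
      | nil => simp [bieosRec, hO, hp, runPat]
      | cons u r =>
        have hu : u ≠ t := by intro h; exact hrest (by simp [h])
        simp [bieosRec, hO, hp, hu, runPat]
    | succ m =>
      rw [show (List.replicate (m+1) t : List String) ++ rest =
            t :: (List.replicate m t ++ rest) by simp [List.replicate_succ]]
      rw [show bieosRec p (t :: t :: (List.replicate m t ++ rest)) =
          "B" :: bieosRec (some t) (t :: (List.replicate m t ++ rest)) by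
        simp [bieosRec, hO, hp]]
      rw [bieos_mid_run t hO m rest hrest]
      have hm : 1 + (m + 1) - 2 = m := by omega
      simp [runPat, hO, hm]

-- Proof-side structural characterisation of the run-length encoding.
def runsB : List String → List (String × Nat)
  | [] => []
  | t :: rest =>
      match runsB rest with
      | (u, k) :: rs => if u = t then (t, k + 1) :: rs else (t, 1) :: (u, k) :: rs
      | [] => [(t, 1)]

-- Forward accumulation of the current run, as Source B's loop does it.
def mergeRec (u : String) (k : Nat) : List String → List (String × Nat)
  | [] => [(u, k)]
  | t :: rest => if t = u then mergeRec u (k + 1) rest else (u, k) :: mergeRec t 1 rest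

-- The foldl over runsStep keeps the finished runs and accumulates the last one.
theorem foldl_runsStep (s : List String) : ∀ (pre : List (String × Nat)) (u : String) (k : Nat),
    s.foldl runsStep (pre ++ [(u, k)]) = pre ++ mergeRec u k s := by
  induction s with
  | nil => intro pre u k; simp [mergeRec]
  | cons t rest ih =>
    intro pre u k
    rw [List.foldl_cons]
    rw [show runsStep (pre ++ [(u, k)]) t =
        (if u = t then pre ++ [(t, k + 1)] else (pre ++ [(u, k)]) ++ [(t, 1)]) by
      simp [runsStep]]
    by_cases hut : u = t
    · subst hut
      rw [if_pos rfl, ih pre u (k + 1)]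
      simp [mergeRec]
    · rw [if_neg hut, ih (pre ++ [(u, k)]) t 1]
      have hne : ¬ t = u := fun h => hut h.symm
      simp [mergeRec, hne]

-- mergeRec merges the accumulated run into the structural encoding of the rest.
theorem mergeRec_eq (s : List String) : ∀ (u : String) (k : Nat),
    mergeRec u k s =
      match runsB s with
      | (v, m) :: rs => if v = u then (u, k + m) :: rs else (u, k) :: (v, m) :: rs
      | [] => [(u, k)] := by
  induction s with
  | nil => intro u k; simp [mergeRec, runsB]
  | cons t rest ih =>
    intro u k
    by_cases htu : t = u
    · subst htu
      rw [show mergeRec t k (t :: rest) = mergeRec t (k + 1) rest by simp [mergeRec]]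
      rw [ih t (k + 1)]
      rw [show runsB (t :: rest) =
          (match runsB rest with
           | (v, m) :: rs => if v = t then (t, m + 1) :: rs else (t, 1) :: (v, m) :: rs
           | [] => [(t, 1)]) from rfl]
      cases h : runsB rest with
      | nil => simp
      | cons p rs =>
        by_cases hv : p.1 = t
        · simp [hv, Nat.add_comm, Nat.add_left_comm]
        · simp [hv]
    · rw [show mergeRec u k (t :: rest) = (u, k) :: mergeRec t 1 rest by simp [mergeRec, htu]]
      rw [ih t 1]
      rw [show runsB (t :: rest) =
          (match runsB rest with
           | (v, m) :: rs => if v = t then (t, m + 1) :: rs else (t, 1) :: (v, m) :: rs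
           | [] => [(t, 1)]) from rfl]
      have hne : ¬ t = u := htu
      cases h : runsB rest with
      | nil => simp [hne]
      | cons p rs =>
        by_cases hv : p.1 = t
        · simp [hv, hne, Nat.add_comm]
        · simp [hv, hne]

-- B's iterative run-length-encoding loop computes the structural encoding.
theorem foldl_runsStep_eq_runsB (s : List String) : s.foldl runsStep [] = runsB s := by
  cases s with
  | nil => rfl
  | cons t rest =>
    rw [List.foldl_cons]
    rw [show runsStep [] t = [] ++ [(t, 1)] by simp [runsStep]]
    rw [foldl_runsStep rest [] t 1]
    rw [mergeRec_eq rest t 1]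
    rw [show runsB (t :: rest) =
        (match runsB rest with
         | (v, m) :: rs => if v = t then (t, m + 1) :: rs else (t, 1) :: (v, m) :: rs
         | [] => [(t, 1)]) from rfl]
    cases h : runsB rest with
    | nil => simp
    | cons p rs =>
      by_cases hv : p.1 = t
      · simp [hv, Nat.add_comm]
      · simp [hv]

-- The structural run-length encoder satisfies the maximal-run (takeWhile/dropWhile) unfolding.
theorem runsB_cons (t : String) (rest : List String) :
    runsB (t :: rest) =
      (t, 1 + (rest.takeWhile (· = t)).length) :: runsB (rest.dropWhile (· = t)) := by
  induction rest generalizing t with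
  | nil => simp [runsB]
  | cons u r ih =>
    by_cases hu : u = t
    · subst hu
      rw [show runsB (u :: u :: r) =
          (match runsB (u :: r) with
           | (v, k) :: rs => if v = u then (u, k + 1) :: rs else (u, 1) :: (v, k) :: rs
           | [] => [(u, 1)]) from rfl]
      rw [ih u]
      simp [Nat.add_comm]
    · rw [show runsB (t :: u :: r) =
          (match runsB (u :: r) with
           | (v, k) :: rs => if v = t then (t, k + 1) :: rs else (t, 1) :: (v, k) :: rs
           | [] => [(t, 1)]) from rfl]
      rw [ih u]
      simp [hu]
      exact (ih u).symm

-- Expanding the run-length encoding reproduces bieosRec with a fresh previous tag.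
theorem flat_runs (n : Nat) : ∀ (s : List String), s.length ≤ n →
    ∀ (p : Option String), (∀ u, s.head? = some u → p ≠ some u) →
    (runsB s).flatMap runPat = bieosRec p s := by
  induction n with
  | zero => intro s hs p _; interval_cases hlen : s.length; simp_all [runsB, bieosRec, List.length_eq_zero_iff.mp hlen]
  | succ n ih =>
    intro s hs p hp
    cases s with
    | nil => simp [runsB, bieosRec]
    | cons t rest =>
      have htake : rest.takeWhile (· = t) = List.replicate (rest.takeWhile (· = t)).length t := by
        apply List.eq_replicate_of_mem
        intro b hb
        have := List.mem_takeWhile_imp hb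
        simpa using this
      have hsplit : rest = List.replicate (rest.takeWhile (· = t)).length t ++ rest.dropWhile (· = t) := by
        conv_lhs => rw [← List.takeWhile_append_dropWhile (p := (· = t)) (l := rest)]
        rw [htake]; simp
      have hdropHead : (rest.dropWhile (· = t)).head? ≠ some t := by
        intro h
        cases hne : rest.dropWhile (· = t) with
        | nil => rw [hne] at h; simp at h
        | cons v r =>
          have := List.head_dropWhile_not (· = t) (l := rest) (by rw [hne]; simp)
          rw [hne] at h
          simp [hne] at this h
          exact this (by simp [h])
      rw [runsB_cons]
      rw [List.flatMap_cons]
      rw [ih (rest.dropWhile (· = t))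
            (le_trans (List.length_dropWhile_le _ rest) (by simpa using Nat.le_of_succ_le_succ hs))
            (some t) (by intro u hu h; have ht : t = u := Option.some.inj h; exact hdropHead (by rw [hu, ht]))]
      have hpt : p ≠ some t := hp t (by simp)
      conv_rhs => rw [show (t :: rest : List String) = t :: (List.replicate (rest.takeWhile (· = t)).length t ++ rest.dropWhile (· = t)) by rw [← hsplit]]
      rw [bieos_run t _ p hpt _ hdropHead]

theorem alt_eq (s : List String) : ot2bieos_ote_alt s = bieosRec none s := by
  have h1 : ot2bieos_ote_alt s = (runsB s).flatMap runPat := by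
    unfold ot2bieos_ote_alt runPat
    rw [foldl_runsStep_eq_runsB, PySem.List.foldl_append_eq_flatMap]
    simp
  rw [h1]
  exact flat_runs s.length s le_rfl none (by intro u _ h; simp at h)

-- The initial prev only matters when it equals the head tag.
theorem bieosRec_head_irrel (s : List String) (p : String) (h : s.head? ≠ some p) :
    bieosRec (some p) s = bieosRec none s := by
  cases s with
  | nil => rfl
  | cons t rest =>
    have hpt : p ≠ t := by intro he; exact h (by simp [he])
    simp [bieosRec, hpt]

-- ===== VERDICT =====
theorem ot2bieos_ote_spec : Claim_unchanged_ot2bieos_ote := by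
  intro s _ hD
  rw [a_eq, alt_eq]
  exact bieosRec_head_irrel s "$$$" (by simpa [D_ot2bieos_ote] using hD)

theorem ot2bieos_ote_changed : Claim_changed_ot2bieos_ote := by
  unfold Claim_changed_ot2bieos_ote; decide

theorem ot2bieos_ote_tight : Claim_exact_ot2bieos_ote := by
  intro s _ hD
  rw [a_eq, alt_eq]
  obtain ⟨rest, rfl⟩ : ∃ rest, s = "$$$" :: rest := by
    cases s with
    | nil => simp [D_ot2bieos_ote] at hD
    | cons t rest => exact ⟨rest, by simp [D_ot2bieos_ote] at hD; simp [hD]⟩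
  cases rest with
  | nil => simp [bieosRec]
  | cons u r =>
    by_cases hu : u = "$$$" <;> simp [bieosRec, hu]
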